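-- pv_equiv track=rewrite | github.com/lenhard01/adventofcode | 2015/day01/main.py | part2
-- ===== SOURCE A (Python) =====
-- def part2(data: list[str]) -> None:
--     floor: int = 0
--     basement = 0
--
--     for i, char in enumerate(data, start=1):
--         if char == "(":
--             floor += 1
--         elif char == ")":
--             floor -= 1
--
--         if floor == -1:
--             return i
-- ===== SOURCE B (Python) =====
-- def part2(data):
--     deltas = [1 if c == "(" else (-1 if c == ")" else 0) for c in data]
--     floors = []
--     f = 0
--     for d in deltas:
--         f += d
--         floors.append(f)
--     for i, f in enumerate(floors, start=1):
--         if f == -1: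
--             return i
--     return None
-- ===== Notes on version B (the rewrite author's own statement) =====
-- stated objective: alternative
-- what changed: A's single fused loop (update floor and test inside one enumerate loop) is split into a three-stage pipeline: map characters to deltas, scan the deltas into cumulative floors, then find the first 1-based position whose floor is -1.
import Mathlib
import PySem

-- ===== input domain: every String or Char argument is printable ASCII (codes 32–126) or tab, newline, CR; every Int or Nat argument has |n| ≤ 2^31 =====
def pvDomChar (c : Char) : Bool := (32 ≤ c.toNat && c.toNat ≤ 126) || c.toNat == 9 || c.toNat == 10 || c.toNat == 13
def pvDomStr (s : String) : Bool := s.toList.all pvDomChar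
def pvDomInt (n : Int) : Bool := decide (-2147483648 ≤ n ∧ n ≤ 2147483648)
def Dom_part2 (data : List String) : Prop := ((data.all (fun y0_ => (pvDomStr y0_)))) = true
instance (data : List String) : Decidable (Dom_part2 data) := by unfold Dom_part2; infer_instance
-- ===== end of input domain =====

-- B splits A's single fused loop into a map → prefix-scan → find pipeline; same O(n) cost, different decomposition.

-- ===== PORT A =====
-- A's for-loop over enumerate(data, start=1) with early return, as structural recursion on data
def part2Go (floor : Int) (i : Int) : List String → Option Int
  | [] => none
  | c :: rest =>
    let floor' := if c == "(" then floor + 1 else if c == ")" then floor - 1 else floor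
    if floor' == -1 then some i else part2Go floor' (i + 1) rest

def part2 (data : List String) : Option Int := part2Go 0 1 data

-- ===== PORT B =====
-- stage 1 of Source B: the delta comprehension
def pvDelta (c : String) : Int := if c == "(" then 1 else if c == ")" then -1 else 0

-- stage 2 of Source B: the running-sum loop building `floors`
def pvScanFloors (f : Int) : List Int → List Int
  | [] => []
  | d :: rest => (f + d) :: pvScanFloors (f + d) rest

-- stage 3 of Source B: the enumerate(..., start=1) search loop
def pvFindBasement (i : Int) : List Int → Option Int
  | [] => none
  | f :: rest => if f == -1 then some i else pvFindBasement (i + 1) rest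

def part2_alt (data : List String) : Option Int :=
  pvFindBasement 1 (pvScanFloors 0 (data.map pvDelta))

-- ===== PRECONDITION & SPEC =====
def Spec_part2 (data : List String) (out : Option Int) : Prop := out = part2_alt data
instance (data : List String) (out : Option Int) : Decidable (Spec_part2 data out) := by unfold Spec_part2; infer_instance

-- ===== CLAIM (what is proved, stated in full; the proofs are below) =====
def Claim_equal_part2 : Prop := ∀ (data : List String), Dom_part2 data → Spec_part2 data (part2 data)

-- ===== LEMMAS AND PROOFS =====
theorem part2Go_eq (data : List String) : ∀ (floor i : Int),
    part2Go floor i data = pvFindBasement i (pvScanFloors floor (data.map pvDelta)) := by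
  induction data with
  | nil => intro floor i; rfl
  | cons c rest ih =>
    intro floor i
    simp only [part2Go, List.map, pvScanFloors, pvFindBasement, pvDelta]
    by_cases h1 : c == "("
    · simp [h1, ih]
    · by_cases h2 : c == ")" <;> simp [h1, h2, ih, sub_eq_add_neg]

-- ===== VERDICT (by name: the statement is the Claim_ definition above) =====
theorem part2_spec : Claim_equal_part2 := by
  intro data _
  unfold Spec_part2 part2 part2_alt
  exact part2Go_eq data 0 1
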